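-- pv_equiv track=rewrite | github.com/Andycillin/udemy-downloader-cli | udemy_downloader.py | split_lectures_to_chapters
-- ===== SOURCE A (Python) =====
-- def split_lectures_to_chapters(lectures):
--     chapters = []
--     chapter = []
--     for idx, item in enumerate(lectures):
--         if item['_class'] == 'chapter' and idx > 0:
--             chapters.append(chapter)
--             chapter = []
--         chapter.append(item)
--     return chapters
-- ===== SOURCE B (Python) =====
-- def split_lectures_to_chapters(lectures):
--     boundaries = [i for i, item in enumerate(lectures) if item['_class'] == 'chapter' and i > 0]
--     return [lectures[s:e] for s, e in zip([0] + boundaries, boundaries)]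
-- ===== Notes on version B (the rewrite author's own statement) =====
-- stated objective: alternative
-- what changed: B replaces A's single stateful accumulation loop (growing the current chapter and flushing it at each boundary) by a two-phase decomposition: one scan collecting chapter-boundary indices, then building each chapter as a slice between consecutive boundaries.
import Mathlib
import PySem

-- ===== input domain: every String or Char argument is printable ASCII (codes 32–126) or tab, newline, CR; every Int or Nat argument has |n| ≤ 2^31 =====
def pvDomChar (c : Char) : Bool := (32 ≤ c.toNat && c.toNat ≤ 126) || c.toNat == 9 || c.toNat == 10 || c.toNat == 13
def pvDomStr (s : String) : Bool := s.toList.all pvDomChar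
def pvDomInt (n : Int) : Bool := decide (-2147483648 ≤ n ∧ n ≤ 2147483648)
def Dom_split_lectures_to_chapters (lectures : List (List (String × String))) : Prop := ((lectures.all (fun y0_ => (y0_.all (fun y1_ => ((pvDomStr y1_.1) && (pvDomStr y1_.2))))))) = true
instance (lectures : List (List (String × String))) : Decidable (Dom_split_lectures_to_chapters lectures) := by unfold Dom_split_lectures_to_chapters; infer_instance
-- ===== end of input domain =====

-- B replaces A's stateful accumulation loop by a two-phase index-then-slice decomposition
-- (find boundary indices, then slice between consecutive boundaries); objective: alternative.

-- ===== PORT A =====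
-- shared helper: the condition "item['_class'] == 'chapter' and idx > 0" (both Pythons write it verbatim)
def pvIsCh (idx : Int) (item : List (String × String)) : Bool :=
  ((PySem.Dict.mk item).getD "_class" "" == "chapter") && decide (0 < idx)

def split_lectures_to_chapters (lectures : List (List (String × String))) : List (List (List (String × String))) :=
  ((PySem.List.enumerate lectures 0).foldl
    (fun (st : List (List (List (String × String))) × List (List (String × String))) p =>
      let st' := if pvIsCh p.1 p.2 then (st.1 ++ [st.2], ([] : List (List (String × String)))) else st
      (st'.1, st'.2 ++ [p.2]))
    ([], [])).1

-- ===== PORT B =====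
def split_lectures_to_chapters_alt (lectures : List (List (String × String))) : List (List (List (String × String))) :=
  let boundaries := ((PySem.List.enumerate lectures 0).filter (fun p => pvIsCh p.1 p.2)).map (·.1)
  (((0 : Int) :: boundaries).zip boundaries).map
    (fun se => PySem.List.slice lectures (some se.1) (some se.2))

-- ===== PRECONDITION & SPEC =====
-- Pre_ excludes inputs where some item lacks the key '_class', on which the Python A raises KeyError
-- (B raises there as well); on every input with the key present A returns normally.
def Pre_split_lectures_to_chapters (lectures : List (List (String × String))) : Prop :=
  (lectures.all (fun item => item.any (fun kv => kv.1 == "_class"))) = true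
instance (lectures : List (List (String × String))) : Decidable (Pre_split_lectures_to_chapters lectures) := by
  unfold Pre_split_lectures_to_chapters; infer_instance

def pvWitness_split_lectures_to_chapters : (List (List (String × String))) :=
  [[("_class", "chapter")], [("_class", "lecture")], [("_class", "chapter")], [("_class", "lecture")]]

def Spec_split_lectures_to_chapters (lectures : List (List (String × String))) (out : List (List (List (String × String)))) : Prop := out = split_lectures_to_chapters_alt lectures
instance (lectures : List (List (String × String))) (out : List (List (List (String × String)))) : Decidable (Spec_split_lectures_to_chapters lectures out) := by unfold Spec_split_lectures_to_chapters; infer_instance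

-- ===== CLAIM (what is proved, stated in full; the proofs are below) =====
def Claim_equal_split_lectures_to_chapters : Prop := ∀ (lectures : List (List (String × String))), Dom_split_lectures_to_chapters lectures → Pre_split_lectures_to_chapters lectures → Spec_split_lectures_to_chapters lectures (split_lectures_to_chapters lectures)

-- ===== LEMMAS AND PROOFS =====

-- A's fold, named for the proof
def pvAFold (lectures : List (List (String × String))) : List (List (List (String × String))) × List (List (String × String)) :=
  (PySem.List.enumerate lectures 0).foldl
    (fun (st : List (List (List (String × String))) × List (List (String × String))) p =>
      let st' := if pvIsCh p.1 p.2 then (st.1 ++ [st.2], ([] : List (List (String × String)))) else st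
      (st'.1, st'.2 ++ [p.2]))
    ([], [])

-- B's boundary indices, named for the proof
def pvBds (lectures : List (List (String × String))) : List Int :=
  ((PySem.List.enumerate lectures 0).filter (fun p => pvIsCh p.1 p.2)).map (·.1)

lemma pvA_eq (l : List (List (String × String))) : split_lectures_to_chapters l = (pvAFold l).1 := rfl

lemma pvB_eq (l : List (List (String × String))) :
    split_lectures_to_chapters_alt l =
      (((0 : Int) :: pvBds l).zip (pvBds l)).map
        (fun se => PySem.List.slice l (some se.1) (some se.2)) := rfl

lemma pv_zip_concat (a : Int) (bs : List Int) (n : Int) :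
    ((a :: bs) ++ [n]).zip (bs ++ [n]) = (a :: bs).zip bs ++ [(bs.getLastD a, n)] := by
  induction bs generalizing a with
  | nil => simp
  | cons b bs ih =>
    simp only [List.cons_append, List.zip_cons_cons]
    rw [← List.cons_append, ih b, List.getLastD_cons]

lemma pv_getLastD_cases (bs : List Int) (d : Int) : bs.getLastD d = d ∨ bs.getLastD d ∈ bs := by
  induction bs generalizing d with
  | nil => simp
  | cons b bs ih =>
    right
    rw [List.getLastD_cons]
    rcases ih b with h | h
    · simp only [List.getLastD_eq_getLast?] at h
      simp [h]
    · exact List.mem_cons_of_mem _ h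

lemma pv_slice_append {α : Type} (l : List α) (x : α) (a b : Int)
    (ha0 : 0 ≤ a) (ha : a ≤ l.length) (hb0 : 0 ≤ b) (hb : b ≤ l.length) :
    PySem.List.slice (l ++ [x]) (some a) (some b) = PySem.List.slice l (some a) (some b) := by
  rw [PySem.List.slice_toNat, PySem.List.slice_toNat]
  rw [List.drop_append_of_le_length (by omega)]
  rw [List.take_append_of_le_length (by simp; omega)]
  all_goals omega

lemma pv_slice_end {α : Type} (l : List α) (x : α) (a : Int)
    (ha0 : 0 ≤ a) (ha : a ≤ l.length) :
    PySem.List.slice (l ++ [x]) (some a) (some (l.length : Int)) = l.drop a.toNat := by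
  rw [PySem.List.slice_toNat]
  rw [List.drop_append_of_le_length (by omega)]
  rw [List.take_append_of_le_length (by simp)]
  rw [List.take_of_length_le (by simp)]
  all_goals omega

-- the main invariant: A's fold state is (B's result, the tail since the last boundary),
-- plus bounds on the boundary indices
lemma pv_main (l : List (List (String × String))) :
    pvAFold l = (split_lectures_to_chapters_alt l, l.drop ((pvBds l).getLastD 0).toNat)
      ∧ ∀ i ∈ pvBds l, 1 ≤ i ∧ i ≤ (l.length : Int) := by
  induction l using List.reverseRecOn with
  | nil => constructor <;> simp [pvAFold, pvBds, split_lectures_to_chapters_alt, PySem.List.enumerate]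
  | append_singleton l x ih =>
    obtain ⟨hst, hbd⟩ := ih
    have hS0 : 0 ≤ (pvBds l).getLastD 0 := by
      rcases pv_getLastD_cases (pvBds l) 0 with h | h
      · omega
      · exact le_of_lt (by exact_mod_cast (hbd _ h).1)
    have hSle : (pvBds l).getLastD 0 ≤ (l.length : Int) := by
      rcases pv_getLastD_cases (pvBds l) 0 with h | h
      · rw [h]
        omega
      · exact (hbd _ h).2
    have henum : PySem.List.enumerate (l ++ [x]) 0
        = PySem.List.enumerate l 0 ++ [((l.length : Int), x)] := by
      rw [PySem.List.enumerate_append]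
      simp [PySem.List.enumerate_cons, PySem.List.enumerate_nil]
    have hfold : pvAFold (l ++ [x])
        = (let st := pvAFold l
           let st' := if pvIsCh (l.length : Int) x then (st.1 ++ [st.2], ([] : List (List (String × String)))) else st
           (st'.1, st'.2 ++ [x])) := by
      simp only [pvAFold, henum, List.foldl_append, List.foldl_cons, List.foldl_nil]
    have hbds : pvBds (l ++ [x])
        = pvBds l ++ (if pvIsCh (l.length : Int) x then [(l.length : Int)] else []) := by
      simp only [pvBds, henum, List.filter_append]
      split <;> simp_all
    have hmapeq :
        ((((0:Int) :: pvBds l).zip (pvBds l)).map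
          (fun se => PySem.List.slice (l ++ [x]) (some se.1) (some se.2)))
        = (((0:Int) :: pvBds l).zip (pvBds l)).map
          (fun se => PySem.List.slice l (some se.1) (some se.2)) := by
      apply List.map_congr_left
      intro se hse
      obtain ⟨h1, h2⟩ := List.of_mem_zip hse
      have h1' : se.1 = 0 ∨ se.1 ∈ pvBds l := by simpa using h1
      have hs0 : 0 ≤ se.1 := by
        rcases h1' with h | h
        · omega
        · exact le_of_lt (by exact_mod_cast (hbd _ h).1)
      have hs1 : se.1 ≤ (l.length : Int) := by
        rcases h1' with h | h
        · simp [h]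
        · exact (hbd _ h).2
      exact pv_slice_append l x se.1 se.2 hs0 hs1
        (le_of_lt (by exact_mod_cast (hbd _ h2).1)) ((hbd _ h2).2)
    have hinv : ∀ i ∈ pvBds (l ++ [x]), 1 ≤ i ∧ i ≤ ((l ++ [x]).length : Int) := by
      intro i hi
      rw [hbds] at hi
      simp only [List.length_append, List.length_cons, List.length_nil]
      rcases List.mem_append.mp hi with h | h
      · have := hbd i h
        push_cast
        omega
      · by_cases hc : pvIsCh (l.length : Int) x = true
        · rw [if_pos hc] at h
          simp only [List.mem_singleton] at h
          subst h
          have : decide ((0:Int) < (l.length : Int)) = true := by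
            simp only [pvIsCh, Bool.and_eq_true] at hc
            exact hc.2
          simp only [decide_eq_true_eq] at this
          push_cast
          omega
        · rw [if_neg hc] at h
          simp at h
    refine ⟨?_, hinv⟩
    rw [hfold]
    by_cases hc : pvIsCh (l.length : Int) x = true
    · simp only [hst, hc, if_true]
      rw [pvB_eq (l ++ [x]), hbds, if_pos hc]
      have hca : (0:Int) :: (pvBds l ++ [(l.length : Int)]) = ((0:Int) :: pvBds l) ++ [(l.length : Int)] := by
        simp
      rw [hca, pv_zip_concat, List.map_append, hmapeq]
      simp only [List.map_cons, List.map_nil]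
      rw [pv_slice_end l x _ hS0 hSle, ← pvB_eq l, List.getLastD_concat]
      simp
    · simp only [hst, hc, Bool.false_eq_true, if_false]
      rw [pvB_eq (l ++ [x]), hbds, if_neg hc, List.append_nil, hmapeq, ← pvB_eq l]
      have h2 : (l ++ [x]).drop ((pvBds l).getLastD 0).toNat
          = l.drop ((pvBds l).getLastD 0).toNat ++ [x] :=
        List.drop_append_of_le_length (by omega)
      rw [h2]

-- ===== VERDICT (by name: the statement is the Claim_ definition above) =====
theorem split_lectures_to_chapters_spec : Claim_equal_split_lectures_to_chapters := by
  intro l _ _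
  unfold Spec_split_lectures_to_chapters
  rw [pvA_eq, (pv_main l).1]
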